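-- pv_equiv track=rewrite | github.com/barel-mishal/InCal_notebooks | incal/functions.py | mask_starts_end_ends
-- ===== SOURCE A (Python) =====
-- def mask_starts_end_ends(marks):
--     def is_starts_mark(mark, temp): return int(mark) != 0 and temp != mark
--     starts_ends = []
--     temp = None
--     for mark in marks:
--         starts = is_starts_mark(mark, temp)
--         temp = mark if starts else None
--         starts_ends.append(starts)
--     return starts_ends
-- ===== SOURCE B (Python) =====
-- from itertools import groupby
--
-- def mask_starts_end_ends(marks):
--     out = []
--     for v, grp in groupby(marks):
--         length = sum(1 for _ in grp)
--         if int(v) != 0: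
--             out.extend(i % 2 == 0 for i in range(length))
--         else:
--             out.extend([False] * length)
--     return out
-- ===== Notes on version B (the rewrite author's own statement) =====
-- stated objective: alternative
-- what changed: Replaces A's per-element stateful scan (temp sentinel reset each step) with a runs-first decomposition: group marks into maximal runs with itertools.groupby, then expand each nonzero run to an alternating True/False parity pattern and each zero run to all False.
import Mathlib
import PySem

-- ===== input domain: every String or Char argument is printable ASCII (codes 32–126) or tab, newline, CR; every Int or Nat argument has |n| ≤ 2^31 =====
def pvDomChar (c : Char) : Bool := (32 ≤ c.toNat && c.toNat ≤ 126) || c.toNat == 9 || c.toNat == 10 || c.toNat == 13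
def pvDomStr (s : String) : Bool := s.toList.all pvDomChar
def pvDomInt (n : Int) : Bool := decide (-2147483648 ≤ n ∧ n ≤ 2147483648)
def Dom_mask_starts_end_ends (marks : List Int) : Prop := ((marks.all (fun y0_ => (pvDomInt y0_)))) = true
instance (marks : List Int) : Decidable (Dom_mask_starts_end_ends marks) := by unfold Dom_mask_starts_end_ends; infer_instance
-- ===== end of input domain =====

-- B replaces A's per-element stateful scan with a runs-first decomposition (maximal runs
-- expanded by parity); objective: alternative (same cost, different algorithm).

-- ===== PORT A =====
-- A: one pass with state (starts_ends, temp); starts = int(mark) != 0 and temp != mark.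
def mask_starts_end_ends (marks : List Int) : List Bool :=
  (marks.foldl
    (fun (st : List Bool × Option Int) mark =>
      let starts := decide (mark ≠ 0) && decide (st.2 ≠ some mark)
      (st.1 ++ [starts], if starts then some mark else none))
    (([] : List Bool), (none : Option Int))).1

-- ===== PORT B =====
-- B: group into maximal runs (groupby ≈ takeWhile/dropWhile on the run head), expand each run.
def mask_starts_end_ends_alt (marks : List Int) : List Bool :=
  match marks with
  | [] => []
  | x :: xs =>
    let run := xs.takeWhile (· == x)
    (if x ≠ 0 then (List.range (run.length + 1)).map (fun i => decide (i % 2 = 0))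
     else List.replicate (run.length + 1) false)
      ++ mask_starts_end_ends_alt (xs.dropWhile (· == x))
termination_by marks.length
decreasing_by
  exact Nat.lt_succ_of_le (List.length_dropWhile_le _ _)

-- ===== PRECONDITION & SPEC =====
def Spec_mask_starts_end_ends (marks : List Int) (out : List Bool) : Prop := out = mask_starts_end_ends_alt marks
instance (marks : List Int) (out : List Bool) : Decidable (Spec_mask_starts_end_ends marks out) := by unfold Spec_mask_starts_end_ends; infer_instance

-- ===== CLAIM (what is proved, stated in full; the proofs are below) =====
def Claim_equal_mask_starts_end_ends : Prop := ∀ (marks : List Int), Dom_mask_starts_end_ends marks → Spec_mask_starts_end_ends marks (mask_starts_end_ends marks)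

-- ===== LEMMAS AND PROOFS =====

-- A's loop, rewritten as structural recursion on the list (same step, no accumulator).
def loopA : Option Int → List Int → List Bool
  | _, [] => []
  | temp, m :: ms =>
    let s := decide (m ≠ 0) && decide (temp ≠ some m)
    s :: loopA (if s then some m else none) ms

theorem foldA_eq (ms : List Int) : ∀ (acc : List Bool) (temp : Option Int),
    (ms.foldl
      (fun (st : List Bool × Option Int) mark =>
        let starts := decide (mark ≠ 0) && decide (st.2 ≠ some mark)
        (st.1 ++ [starts], if starts then some mark else none))
      (acc, temp)).1 = acc ++ loopA temp ms := by
  induction ms with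
  | nil => intro acc temp; simp [loopA]
  | cons m ms ih =>
    intro acc temp
    simp only [List.foldl_cons, loopA, ih, List.append_assoc, List.singleton_append]

-- The loop's state matters only through its comparison with the next element's value.
theorem loopA_state_indep (v : Int) (rest : List Int) (h : rest.head? ≠ some v) :
    loopA (some v) rest = loopA none rest := by
  cases rest with
  | nil => rfl
  | cons m ms =>
    simp only [List.head?_cons] at h
    simp [loopA, Ne.symm h]

-- A nonzero run of length n starting at parity k produces the alternating pattern.
theorem loopA_run (v : Int) (hv : v ≠ 0) (n : Nat) : ∀ (k : Nat) (rest : List Int),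
    loopA (if k % 2 = 0 then none else some v) (List.replicate n v ++ rest)
      = (List.range n).map (fun i => decide ((i + k) % 2 = 0))
        ++ loopA (if (n + k) % 2 = 0 then none else some v) rest := by
  induction n with
  | zero => intro k rest; simp
  | succ n ih =>
    intro k rest
    rw [List.replicate_succ, List.cons_append]
    rcases Nat.even_or_odd k with hk | hk
    · have h2 : k % 2 = 0 := Nat.even_iff.mp hk
      rw [if_pos h2]
      have hs : (decide (v ≠ 0) && decide ((none : Option Int) ≠ some v)) = true := by
        simp [hv]
      simp only [loopA, hs, if_true]
      have hIH := ih (k + 1) rest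
      rw [if_neg (by omega : ¬ (k + 1) % 2 = 0)] at hIH
      rw [hIH, List.range_succ_eq_map, List.map_cons, List.map_map, List.cons_append]
      congr 1
      · simp [h2]
      congr 1
      · apply List.map_congr_left
        intro i _
        have hik : i + 1 + k = i + (k + 1) := by omega
        simp [Function.comp, hik]
      · have hnk : n + (k + 1) = n + 1 + k := by omega
        rw [hnk]
    · have h2 : k % 2 = 1 := Nat.odd_iff.mp hk
      rw [if_neg (by omega : ¬ k % 2 = 0)]
      have hs : (decide (v ≠ 0) && decide ((some v : Option Int) ≠ some v)) = false := by
        simp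
      simp only [loopA, hs, Bool.false_eq_true, if_false]
      have hIH := ih (k + 1) rest
      rw [if_pos (by omega : (k + 1) % 2 = 0)] at hIH
      rw [hIH, List.range_succ_eq_map, List.map_cons, List.map_map, List.cons_append]
      congr 1
      · simp [h2]
      congr 1
      · apply List.map_congr_left
        intro i _
        have hik : i + 1 + k = i + (k + 1) := by omega
        simp [Function.comp, hik]
      · have hnk : n + (k + 1) = n + 1 + k := by omega
        rw [hnk]

-- A zero run produces all-False and leaves the state at none.
theorem loopA_zero_run (n : Nat) (rest : List Int) :
    loopA none (List.replicate n (0 : Int) ++ rest)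
      = List.replicate n false ++ loopA none rest := by
  induction n with
  | zero => simp
  | succ n ih =>
    rw [List.replicate_succ, List.cons_append, List.replicate_succ]
    simp [loopA, ih]

theorem takeWhile_eq_replicate (x : Int) (xs : List Int) :
    xs.takeWhile (· == x) = List.replicate (xs.takeWhile (· == x)).length x := by
  apply List.eq_replicate_length.mpr
  intro b hb
  have := List.mem_takeWhile_imp hb
  simpa using this

theorem head?_dropWhile_ne (x : Int) (xs : List Int) :
    (xs.dropWhile (· == x)).head? ≠ some x := by
  induction xs with
  | nil => simp
  | cons a as ih =>
    by_cases h : a = x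
    · simpa [h] using ih
    · simp [h]

theorem loopA_eq_alt (marks : List Int) : loopA none marks = mask_starts_end_ends_alt marks := by
  induction marks using mask_starts_end_ends_alt.induct with
  | case1 => rw [mask_starts_end_ends_alt]; rfl
  | case2 x xs ih =>
    have hdec : x :: xs = List.replicate ((xs.takeWhile (· == x)).length + 1) x
        ++ xs.dropWhile (· == x) := by
      rw [List.replicate_succ, List.cons_append]
      congr 1
      conv_lhs => rw [← List.takeWhile_append_dropWhile (p := (· == x)) (l := xs)]
      congr 1
      exact takeWhile_eq_replicate x xs
    rw [mask_starts_end_ends_alt]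
    by_cases hx : x = 0
    · subst hx
      rw [hdec, loopA_zero_run, ih]
      simp
    · rw [hdec]
      have hrun := loopA_run x hx ((xs.takeWhile (· == x)).length + 1) 0 (xs.dropWhile (· == x))
      rw [if_pos (by norm_num : (0 : Nat) % 2 = 0)] at hrun
      simp only [Nat.add_zero] at hrun
      rw [hrun, if_pos hx]
      congr 1
      rw [← ih]
      by_cases hp : ((xs.takeWhile (· == x)).length + 1) % 2 = 0
      · rw [if_pos hp]
      · rw [if_neg hp]
        exact loopA_state_indep x _ (head?_dropWhile_ne x xs)

-- ===== VERDICT (by name: the statement is the Claim_ definition above) =====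
theorem mask_starts_end_ends_spec : Claim_equal_mask_starts_end_ends := by
  intro marks _
  unfold Spec_mask_starts_end_ends mask_starts_end_ends
  rw [foldA_eq marks [] none, List.nil_append, loopA_eq_alt]
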